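-- pv_equiv track=rewrite | github.com/nkd3v/kmitl-oods | other/old.py | gen_pattern
-- ===== SOURCE A (Python) =====
-- def gen_pattern(chars):
--     r = []
--     l = len(chars)
--     for i in range(-l + 1, l):
--         p = chars[:-l - 1 + abs(i):-1]
--         q = '' if (-l + 1 + abs(i) == 0) else chars[-l + 1 + abs(i)::1]
--         r.append(('.'.join(p + q)).center(l * 4 - 3, '.'))
--     return '\n'.join(r)
-- ===== SOURCE B (Python) =====
-- def gen_pattern(chars):
--     l = len(chars)
--     if l == 0:
--         return ''
--     rows = ['.' * (2 * d)
--             + '.'.join([chars[j] for j in range(l - 1, d, -1)]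
--                        + [chars[j] for j in range(d, l)])
--             + '.' * (2 * d)
--             for d in range(l)]
--     return '\n'.join([rows[d] for d in range(l - 1, -1, -1)]
--                      + [rows[d] for d in range(1, l)])
-- ===== Notes on version B (the rewrite author's own statement) =====
-- stated objective: alternative
-- what changed: B builds a table of the l distinct rows once (with explicit symmetric dot padding instead of str.center and reverse string slicing) and assembles the final pattern by mirroring that table, instead of A's single flat loop over range(-l+1, l) that re-derives each row from abs(i) via negative-step slices and center().
import Mathlib
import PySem

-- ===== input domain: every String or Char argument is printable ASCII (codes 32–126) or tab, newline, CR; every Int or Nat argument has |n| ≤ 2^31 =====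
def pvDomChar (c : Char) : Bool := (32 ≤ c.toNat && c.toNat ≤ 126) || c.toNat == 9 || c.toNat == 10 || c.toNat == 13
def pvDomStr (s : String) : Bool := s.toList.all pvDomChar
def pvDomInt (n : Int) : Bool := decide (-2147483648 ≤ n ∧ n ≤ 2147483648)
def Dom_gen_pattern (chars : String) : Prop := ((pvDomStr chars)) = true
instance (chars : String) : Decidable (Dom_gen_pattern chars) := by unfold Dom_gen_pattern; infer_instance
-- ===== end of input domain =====

-- B builds a table of the l distinct rows once (explicit symmetric padding) and assembles the
-- pattern by mirroring that table, instead of A's flat abs-indexed loop with reverse slices and center().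


-- ===== PORT A =====
-- hand port of str.center(w, fill), exact per CPython: margin = w - len; the left margin gets
-- the extra fill character iff margin and width are both odd (marg & width & 1 = marg%2 * width%2)
def pyCenter (cs : List Char) (w : Int) (fill : Char) : List Char :=
  if w ≤ (cs.length : Int) then cs
  else
    List.replicate ((w - cs.length).toNat / 2 + ((w - cs.length).toNat % 2) * (w.toNat % 2)) fill
      ++ cs ++
    List.replicate ((w - cs.length).toNat
      - ((w - cs.length).toNat / 2 + ((w - cs.length).toNat % 2) * (w.toNat % 2))) fill

def gen_pattern (chars : String) : String :=
  let cs := chars.toList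
  let l : Int := cs.length
  let r : List (List Char) :=
    (PySem.List.pyRange (-l + 1) l 1).foldl (fun r i =>
      -- p = chars[:-l-1+abs(i):-1]; step -1 ≠ 0, so slice? is never none and .getD [] is unreachable
      let p := (PySem.List.slice? cs none (some (-l - 1 + |i|)) (-1)).getD []
      let q := if -l + 1 + |i| = 0 then [] else PySem.List.slice cs (some (-l + 1 + |i|)) none
      r ++ [pyCenter (PySem.Chars.join ['.'] ((p ++ q).map (fun c => [c]))) (l * 4 - 3) '.']) []
  String.ofList (PySem.Chars.join ['\n'] r)

-- ===== PORT B =====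
def gen_pattern_alt (chars : String) : String :=
  let cs := chars.toList
  let l : Int := cs.length
  if l = 0 then "" else
  let rows : List (List Char) :=
    (PySem.List.pyRange 0 l 1).map (fun d =>
      -- chars[j]: every j produced by the two ranges is in range, so pyGetD is exact here
      List.replicate (2 * d).toNat '.'
        ++ PySem.Chars.join ['.']
            (((PySem.List.pyRange (l - 1) d (-1)).map (fun j => PySem.List.pyGetD cs j ' ')
              ++ (PySem.List.pyRange d l 1).map (fun j => PySem.List.pyGetD cs j ' ')).map
              (fun c => [c]))
        ++ List.replicate (2 * d).toNat '.')
  String.ofList (PySem.Chars.join ['\n']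
    ((PySem.List.pyRange (l - 1) (-1) (-1)).map (fun d => PySem.List.pyGetD rows d [])
      ++ (PySem.List.pyRange 1 l 1).map (fun d => PySem.List.pyGetD rows d [])))

-- ===== PRECONDITION & SPEC =====
def Spec_gen_pattern (chars : String) (out : String) : Prop := out = gen_pattern_alt chars
instance (chars : String) (out : String) : Decidable (Spec_gen_pattern chars out) := by unfold Spec_gen_pattern; infer_instance

-- ===== CLAIM (what is proved, stated in full; the proofs are below) =====
def Claim_equal_gen_pattern : Prop := ∀ (chars : String), Dom_gen_pattern chars → Spec_gen_pattern chars (gen_pattern chars)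

-- ===== LEMMAS AND PROOFS =====

-- length of '.'.join over single-character pieces
theorem pv_join_len (xs : List Char) :
    (PySem.Chars.join ['.'] (xs.map (fun c => [c]))).length = 2 * xs.length - 1 := by
  induction xs with
  | nil => simp [PySem.Chars.join_nil]
  | cons a t ih =>
    cases t with
    | nil => simp [PySem.Chars.join_singleton]
    | cons b t' =>
      rw [List.map_cons, List.map_cons, PySem.Chars.join_cons_cons]
      rw [List.map_cons] at ih
      simp only [List.length_append, List.length_cons, List.length_nil] at *
      omega

theorem pv_aux (cs : List Char) (k : Nat) (hk : k ≤ cs.length) :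
    List.filterMap (fun (x : Nat) => cs[((cs.length:Int) - 1 + -(x:Int)).toNat]?) (List.range k)
      = (cs.drop (cs.length - k)).reverse := by
  induction k with
  | zero => simp [List.drop_length]
  | succ k ih =>
    rw [List.range_succ, List.filterMap_append, ih (by omega)]
    have hd : cs.length - (k+1) < cs.length := by omega
    have hidx : (((cs.length:Int) - 1 + -(k:Int))).toNat = cs.length - (k+1) := by omega
    rw [List.drop_eq_getElem_cons hd, List.reverse_cons]
    simp only [List.filterMap_cons, List.filterMap_nil, hidx]
    have hg : cs[cs.length - (k+1)]? = some cs[cs.length - (k+1)] := List.getElem?_eq_getElem hd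
    rw [hg]
    have h1 : cs.length - (k+1) + 1 = cs.length - k := by omega
    rw [h1]

-- A's reverse slice chars[:d-l-1:-1] is the reversed suffix from index d
theorem pv_sliceA (cs : List Char) (d : Nat) (h : d < cs.length) :
    PySem.List.slice? cs none (some ((d : Int) - cs.length - 1)) (-1)
      = some ((cs.drop d).reverse) := by
  have hI : PySem.List.sliceIndices cs.length none (some ((d:Int) - cs.length - 1)) (-1)
      = ((cs.length : Int) - 1, (d : Int) - 1, -1) := by
    simp only [PySem.List.sliceIndices, Int.reduceNeg, Int.neg_neg_iff_pos, zero_lt_one,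
      ↓reduceIte, sub_neg, Prod.mk.injEq, and_true, true_and]
    split_ifs
    omega
    omega
  simp only [PySem.List.slice?, Int.reduceNeg, neg_eq_zero, one_ne_zero, ↓reduceIte, hI,
    Option.some.injEq]
  norm_num
  rw [if_pos h]
  have haux := pv_aux cs (cs.length - d) (by omega)
  have h2 : cs.length - (cs.length - d) = d := by omega
  rw [h2] at haux
  convert haux using 2

-- chars[d-l+1::1] is the suffix from index d+1 (for d+1 < l)
theorem pv_sliceQ (cs : List Char) (d : Nat) (h : d + 1 < cs.length) :
    PySem.List.slice cs (some ((d : Int) - cs.length + 1)) none = cs.drop (d + 1) := by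
  rw [PySem.List.slice_some_none]
  congr 1
  simp only [PySem.List.clampIdx]
  split_ifs
  omega
  omega
  omega

theorem pv_row_core (cs : List Char) (k : Nat) (hk : k < cs.length) :
    (cs.drop k).reverse ++ cs.drop (k+1) = (cs.drop (k+1)).reverse ++ cs.drop k := by
  rw [List.drop_eq_getElem_cons hk, List.reverse_cons]
  simp

theorem pv_range_fst (cs : List Char) (d : Int) (h0 : 0 ≤ d) :
    (PySem.List.pyRange ((cs.length:Int) - 1) d (-1)).map (fun j => PySem.List.pyGetD cs j ' ')
      = (cs.drop (d+1).toNat).reverse := by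
  rw [PySem.List.pyRange_neg_one_eq_reverse, List.map_reverse]
  congr 1
  have h1 : (cs.length:Int) - 1 + 1 = (cs.length:Int) := by ring
  rw [h1, PySem.List.map_pyGetD_pyRange' cs ' ' (show (0:Int) ≤ d+1 by omega)]

theorem pv_center (core : List Char) (n k : Nat) (hlen : core.length = 4*(n-k) - 3)
    (hk : k < n) :
    pyCenter core ((n:Int)*4 - 3) '.'
      = List.replicate (2*k) '.' ++ core ++ List.replicate (2*k) '.' := by
  unfold pyCenter
  split_ifs with hw
  · have hk0 : k = 0 := by omega
    subst hk0
    simp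
  · have hm : (((n:Int)*4 - 3) - core.length).toNat = 4*k := by omega
    have hw2 : ((n:Int)*4 - 3).toNat % 2 = 1 := by omega
    rw [hm, hw2]
    have hleft : 4*k/2 + (4*k % 2) * 1 = 2*k := by omega
    rw [hleft]
    have hright : 4*k - 2*k = 2*k := by omega
    rw [hright]

-- the abs-indexed range of A is the mirrored pair of countdown/countup ranges of B
theorem pv_abs_split (l : Int) (hl : 1 ≤ l) (g : Int → List Char) :
    (PySem.List.pyRange (-l + 1) l 1).map (fun i => g |i|)
      = (PySem.List.pyRange (l - 1) (-1) (-1)).map g ++ (PySem.List.pyRange 1 l 1).map g := by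
  rw [PySem.List.pyRange_one_append (-l+1) 1 l (by omega) (by omega), List.map_append]
  congr 1
  · rw [PySem.List.pyRange_one, PySem.List.pyRange_neg_one, List.map_map, List.map_map]
    have h1 : (1 - (-l+1)).toNat = l.toNat := by omega
    have h2 : ((l-1) - (-1)).toNat = l.toNat := by omega
    rw [h1, h2]
    apply List.map_congr_left
    intro k hk
    rw [List.mem_range] at hk
    simp only [Function.comp]
    have habs : |(-l + 1 + (k:Int))| = l - 1 - k := by
      rw [abs_of_nonpos (by omega)]
      ring
    rw [habs]
  · apply List.map_congr_left
    intro i hi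
    rw [PySem.List.mem_pyRange_one] at hi
    rw [abs_of_nonneg (by omega)]

-- one row of A equals one row of B, for 0 ≤ d < l
theorem pv_row_eq (cs : List Char) (d : Int) (h0 : 0 ≤ d) (h1 : d < (cs.length:Int)) :
    pyCenter (PySem.Chars.join ['.']
        (((PySem.List.slice? cs none (some (-(cs.length:Int) - 1 + d)) (-1)).getD []
          ++ (if -(cs.length:Int) + 1 + d = 0 then []
              else PySem.List.slice cs (some (-(cs.length:Int) + 1 + d)) none)).map (fun c => [c])))
      ((cs.length:Int) * 4 - 3) '.'
    = List.replicate (2*d).toNat '.'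
        ++ PySem.Chars.join ['.']
            (((PySem.List.pyRange ((cs.length:Int) - 1) d (-1)).map (fun j => PySem.List.pyGetD cs j ' ')
              ++ (PySem.List.pyRange d (cs.length:Int) 1).map (fun j => PySem.List.pyGetD cs j ' ')).map
              (fun c => [c]))
        ++ List.replicate (2*d).toNat '.' := by
  obtain ⟨k, rfl⟩ : ∃ k : Nat, d = (k:Int) := ⟨d.toNat, by omega⟩
  have hk : k < cs.length := by omega
  have ha : -(cs.length:Int) - 1 + k = (k:Int) - cs.length - 1 := by ring
  rw [ha, pv_sliceA cs k hk, Option.getD_some]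
  have hq : (if -(cs.length:Int) + 1 + k = 0 then []
      else PySem.List.slice cs (some (-(cs.length:Int) + 1 + k)) none) = cs.drop (k+1) := by
    split_ifs with hc
    · rw [eq_comm, List.drop_eq_nil_iff]
      omega
    · have ha2 : -(cs.length:Int) + 1 + k = (k:Int) - cs.length + 1 := by ring
      rw [ha2]
      exact pv_sliceQ cs k (by omega)
  rw [hq, pv_range_fst cs k (by omega), PySem.List.map_pyGetD_pyRange' cs ' ' (show (0:Int) ≤ k by omega)]
  have hk1 : ((k:Int)+1).toNat = k + 1 := by omega
  have hk2 : ((k:Int)).toNat = k := by omega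
  rw [hk1, hk2, pv_row_core cs k hk]
  have h2k : ((2*(k:Int))).toNat = 2*k := by omega
  rw [h2k]
  apply pv_center
  · rw [pv_join_len]
    simp only [List.length_append, List.length_reverse, List.length_drop]
    omega
  · omega

-- rows[d] of B's table is B's row body, for 0 ≤ d < l
theorem pv_rows_get (cs : List Char) (f : Int → List Char) (d : Int) (h0 : 0 ≤ d)
    (h1 : d < (cs.length:Int)) :
    PySem.List.pyGetD ((PySem.List.pyRange 0 (cs.length:Int) 1).map f) d []
      = f d := by
  exact PySem.List.pyGetD_map_pyRange_of_nonneg f (cs.length:Int) d [] h0 h1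

-- ===== VERDICT (by name: the statement is the Claim_ definition above) =====
theorem gen_pattern_spec : Claim_equal_gen_pattern := by
  intro chars _
  unfold Spec_gen_pattern gen_pattern gen_pattern_alt
  simp only []
  by_cases hn : chars.toList.length = 0
  · rw [hn]
    norm_num [PySem.List.pyRange_one_eq_nil, PySem.Chars.join_nil]
  · have hl : 1 ≤ (chars.toList.length : Int) := by omega
    rw [if_neg (by omega)]
    congr 1
    rw [PySem.List.foldl_append_singleton_eq_map, List.nil_append]
    rw [pv_abs_split (chars.toList.length : Int) hl
      (fun d => pyCenter (PySem.Chars.join ['.']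
        (((PySem.List.slice? chars.toList none (some (-(chars.toList.length:Int) - 1 + d)) (-1)).getD []
          ++ (if -(chars.toList.length:Int) + 1 + d = 0 then []
              else PySem.List.slice chars.toList (some (-(chars.toList.length:Int) + 1 + d)) none)).map (fun c => [c])))
        ((chars.toList.length:Int) * 4 - 3) '.')]
    congr 1
    congr 1
    · apply List.map_congr_left
      intro d hd
      rw [PySem.List.mem_pyRange_neg_one] at hd
      rw [pv_rows_get chars.toList _ d (by omega) (by omega)]
      exact pv_row_eq chars.toList d (by omega) (by omega)
    · apply List.map_congr_left
      intro d hd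
      rw [PySem.List.mem_pyRange_one] at hd
      rw [pv_rows_get chars.toList _ d (by omega) (by omega)]
      exact pv_row_eq chars.toList d (by omega) (by omega)
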